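-- pv_equiv track=rewrite | github.com/Tomeu7/Real-Time-Vision-For-Social-Robots | src/emorobcare_cv_hri_yesno_recognition/emorobcare_cv_hri_yesno_recognition/node_hri_yesno_recognition.py | count_oscillations
-- ===== SOURCE A (Python) =====
-- def count_oscillations(values):
--     """Count peaks and valleys (direction changes) in a value sequence."""
--     if len(values) < 3:
--         return 0
--
--     peaks = 0
--     for i in range(1, len(values) - 1):
--         if values[i] > values[i - 1] and values[i] > values[i + 1]:
--             peaks += 1
--         elif values[i] < values[i - 1] and values[i] < values[i + 1]:
--             peaks += 1
--     return peaks
-- ===== SOURCE B (Python) =====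
-- def count_oscillations(values):
--     """Count peaks and valleys (direction changes) in a value sequence."""
--     # Stage 1: difference signs; stage 2: split at plateaus (zero signs) into
--     # segments; stage 3: run-length-collapse each segment into its monotone
--     # run directions; direction changes per segment = number of runs - 1.
--     signs = [(b > a) - (b < a) for a, b in zip(values, values[1:])]
--     segments = []
--     cur = []
--     for s in signs:
--         if s == 0:
--             if cur:
--                 segments.append(cur)
--                 cur = []
--         else:
--             cur.append(s)
--     if cur:
--         segments.append(cur)
--     total = 0
--     for seg in segments:
--         dirs = [seg[0]]
--         for s in seg[1:]:
--             if s != dirs[-1]: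
--                 dirs.append(s)
--         total += len(dirs) - 1
--     return total
-- ===== Notes on version B (the rewrite author's own statement) =====
-- stated objective: alternative
-- what changed: B replaces A's per-index comparison of each point with both neighbours by a staged run-based pipeline: it computes difference signs, splits them at plateaus into segments, run-length-collapses each segment into monotone run directions, and sums (runs-1) per segment.
import Mathlib
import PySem

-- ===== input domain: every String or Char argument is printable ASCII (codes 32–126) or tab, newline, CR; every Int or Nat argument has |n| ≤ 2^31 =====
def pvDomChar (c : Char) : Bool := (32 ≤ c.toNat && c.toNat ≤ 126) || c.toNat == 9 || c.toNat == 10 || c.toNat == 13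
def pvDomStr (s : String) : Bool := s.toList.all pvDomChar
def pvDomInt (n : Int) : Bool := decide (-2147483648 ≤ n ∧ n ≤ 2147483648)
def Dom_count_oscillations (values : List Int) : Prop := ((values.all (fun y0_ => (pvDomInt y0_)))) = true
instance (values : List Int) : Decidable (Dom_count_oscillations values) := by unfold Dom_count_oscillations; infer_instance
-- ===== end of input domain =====

-- B counts direction changes as (monotone runs - 1) per plateau-free segment of the
-- difference-sign sequence, instead of comparing each point to both neighbours
-- (objective: alternative run-based decomposition; same O(n) cost).

-- ===== PORT A =====
-- loop body of A's for-loop (if/elif/else, in source order)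
def stepA (values : List Int) (peaks : Int) (i : Int) : Int :=
  if PySem.List.pyGetD values i 0 > PySem.List.pyGetD values (i - 1) 0 ∧
     PySem.List.pyGetD values i 0 > PySem.List.pyGetD values (i + 1) 0 then peaks + 1
  else if PySem.List.pyGetD values i 0 < PySem.List.pyGetD values (i - 1) 0 ∧
          PySem.List.pyGetD values i 0 < PySem.List.pyGetD values (i + 1) 0 then peaks + 1
  else peaks

def count_oscillations (values : List Int) : Int :=
  if values.length < 3 then 0
  else (PySem.List.pyRange 1 ((values.length : Int) - 1) 1).foldl (stepA values) 0

-- ===== PORT B =====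
-- (b > a) - (b < a): the sign of the consecutive difference
def sgnB (a b : Int) : Int := (if a < b then 1 else 0) - (if b < a then 1 else 0)

-- signs = [(b > a) - (b < a) for a, b in zip(values, values[1:])]
def signsB (values : List Int) : List Int :=
  (values.zip values.tail).map (fun p => sgnB p.1 p.2)

-- stage-2 loop body: split the sign list at zeros into plateau-free segments
def stage1 (st : List (List Int) × List Int) (s : Int) : List (List Int) × List Int :=
  if s = 0 then (if st.2 ≠ [] then (st.1 ++ [st.2], ([] : List Int)) else st)
  else (st.1, st.2 ++ [s])

-- stage-3 body: dirs = run-length collapse of seg; result len(dirs) - 1.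
-- segments built by stage1 are never empty, so the [] case is unreachable
def segCount (seg : List Int) : Int :=
  match seg with
  | [] => 0
  | s0 :: rest =>
      let dirs := rest.foldl (fun dirs s => if s ≠ dirs.getLastD 0 then dirs ++ [s] else dirs) [s0]
      (dirs.length : Int) - 1

def count_oscillations_alt (values : List Int) : Int :=
  let st := (signsB values).foldl stage1 ([], [])
  let segments := if st.2 ≠ [] then st.1 ++ [st.2] else st.1
  segments.foldl (fun total seg => total + segCount seg) 0

-- ===== PRECONDITION & SPEC =====
def Spec_count_oscillations (values : List Int) (out : Int) : Prop := out = count_oscillations_alt values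
instance (values : List Int) (out : Int) : Decidable (Spec_count_oscillations values out) := by unfold Spec_count_oscillations; infer_instance

-- ===== CLAIM (what is proved, stated in full; the proofs are below) =====
def Claim_equal_count_oscillations : Prop := ∀ (values : List Int), Dom_count_oscillations values → Spec_count_oscillations values (count_oscillations values)

-- ===== LEMMAS AND PROOFS =====

-- common reference: structural recursion over sliding windows of three
def tri : List Int → Int
  | a :: b :: c :: t =>
    (if b > a ∧ b > c then 1 else if b < a ∧ b < c then 1 else 0) + tri (b :: c :: t)
  | _ => 0

-- ---- A = tri ----

-- A's loop-body value at loop index k+1, expressed with Nat indexing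
def ind (l : List Int) (k : Nat) : Int :=
  if l.getD (k+1) 0 > l.getD k 0 ∧ l.getD (k+1) 0 > l.getD (k+2) 0 then 1
  else if l.getD (k+1) 0 < l.getD k 0 ∧ l.getD (k+1) 0 < l.getD (k+2) 0 then 1 else 0

lemma ind_cons (a : Int) (l : List Int) (k : Nat) : ind (a :: l) (k+1) = ind l k := by
  simp [ind]

lemma stepA_cast (l : List Int) (acc : Int) (k : Nat) :
    stepA l acc (1 + (k : Int)) = acc + ind l k := by
  have h3 : (1 + (k : Int)) + 1 = ((k+2 : Nat) : Int) := by omega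
  have h2 : (1 + (k : Int)) - 1 = ((k : Nat) : Int) := by omega
  have h1 : (1 + (k : Int)) = ((k+1 : Nat) : Int) := by omega
  unfold stepA ind
  rw [h3, h2, h1]
  simp only [PySem.List.pyGetD_natCast]
  split_ifs <;> omega

lemma fold_range (l : List Int) : ∀ (m : Nat) (acc : Int),
    (List.range m).foldl (fun (a : Int) (k : Nat) => stepA l a (1 + (k : Int))) acc
      = acc + ((List.range m).map (ind l)).sum := by
  intro m
  induction m with
  | zero => simp
  | succ m ih =>
    intro acc
    rw [List.range_succ, List.foldl_append, ih]
    simp [List.foldl, stepA_cast]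
    ring

lemma sum_ind_eq_tri : ∀ (l : List Int),
    ((List.range (l.length - 2)).map (ind l)).sum = tri l
  | [] => by simp [tri]
  | [_] => by simp [tri]
  | [_, _] => by simp [tri]
  | a :: b :: c :: t => by
    have ih := sum_ind_eq_tri (b :: c :: t)
    have hl : (a :: b :: c :: t).length - 2 = ((b :: c :: t).length - 2) + 1 := by
      simp
    rw [hl, List.range_succ_eq_map]
    simp only [List.map_cons, List.map_map, List.sum_cons]
    have hmap : ((List.range ((b :: c :: t).length - 2)).map (ind (a :: b :: c :: t) ∘ Nat.succ))
        = (List.range ((b :: c :: t).length - 2)).map (ind (b :: c :: t)) := by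
      apply List.map_congr_left
      intro k _
      simpa using ind_cons a (b :: c :: t) k
    rw [hmap, ih]
    show ind (a :: b :: c :: t) 0 + tri (b :: c :: t) = tri (a :: b :: c :: t)
    simp only [ind, tri, List.getD]
    norm_num

lemma A_eq_tri (l : List Int) : count_oscillations l = tri l := by
  unfold count_oscillations
  split_ifs with h
  · match l, h with
    | [], _ => simp [tri]
    | [_], _ => simp [tri]
    | [_, _], _ => simp [tri]
  · rw [PySem.List.pyRange_one, List.foldl_map]
    have htn : (((l.length : Int) - 1) - 1).toNat = l.length - 2 := by omega
    rw [htn, fold_range, sum_ind_eq_tri]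
    ring

-- ---- B = tri ----

-- number of adjacent unequal pairs (value of one collapsed segment)
def chg : List Int → Int
  | x :: y :: t => (if x ≠ y then 1 else 0) + chg (y :: t)
  | _ => 0

-- opposite-sign pair count over a sign list, carrying the previous sign (0 = none)
def oppRun : Int → List Int → Int
  | _, [] => 0
  | p, x :: t => (if p ≠ 0 ∧ x ≠ 0 ∧ p ≠ x then 1 else 0) + oppRun x t

lemma oppRun_zero (p : Int) (t : List Int) : oppRun p (0 :: t) = oppRun 0 t := by
  simp [oppRun]

lemma getLastD_irrel (a d : Int) (l : List Int) :
    (a :: l).getLastD d = (a :: l).getLastD 0 := rfl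

lemma lastD_ne_zero : ∀ (l : List Int), (0 : Int) ∉ l → l ≠ [] → l.getLastD 0 ≠ 0
  | [a], h, _ => by
    intro e
    exact h (by simp_all [List.getLastD])
  | a :: b :: t, h, _ => by
    have ih := lastD_ne_zero (b :: t) (fun hm => h (List.mem_cons_of_mem a hm)) (by simp)
    simpa [List.getLastD_cons, ← getLastD_irrel b a t] using ih

lemma chg_append (x : Int) : ∀ (cur : List Int),
    chg (cur ++ [x]) = chg cur + (if cur ≠ [] ∧ cur.getLastD 0 ≠ x then 1 else 0)
  | [] => by simp [chg]
  | [a] => by by_cases h : a = x <;> simp [chg, h, List.getLastD]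
  | a :: b :: t => by
    have ih := chg_append x (b :: t)
    show (if a ≠ b then (1:Int) else 0) + chg (b :: t ++ [x]) = _
    rw [ih]
    have hl : (a :: b :: t).getLastD 0 = (b :: t).getLastD 0 := by
      rw [List.getLastD_cons, getLastD_irrel]
    rw [hl]
    simp only [chg, ne_eq, reduceCtorEq, not_false_eq_true, true_and]
    ring

-- stage-3 foldl invariant: dirs length grows by the adjacent-change count
lemma dirs_len : ∀ (rest dirs : List Int), dirs ≠ [] →
    ((rest.foldl (fun dirs s => if s ≠ dirs.getLastD 0 then dirs ++ [s] else dirs) dirs).length : Int)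
      = dirs.length + chg (dirs.getLastD 0 :: rest)
  | [], dirs, _ => by simp [chg]
  | s :: t, dirs, h => by
    simp only [List.foldl_cons]
    by_cases hs : s = dirs.getLastD 0
    · rw [if_neg (by simp [hs])]
      rw [dirs_len t dirs h]
      simp [chg, hs]
    · rw [if_pos (by simpa using hs)]
      rw [dirs_len t (dirs ++ [s]) (by simp)]
      have hlast : (dirs ++ [s]).getLastD 0 = s := by simp
      rw [hlast]
      have hone : (if dirs.getLastD 0 ≠ s then (1:Int) else 0) = 1 :=
        if_pos (fun e => hs e.symm)
      simp only [chg, hone, List.length_append, List.length_cons, List.length_nil]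
      push_cast
      ring

lemma segCount_eq_chg : ∀ (seg : List Int), segCount seg = chg seg
  | [] => by simp [segCount, chg]
  | s0 :: rest => by
    simp only [segCount]
    rw [dirs_len rest [s0] (by simp)]
    simp [List.getLastD]

lemma foldl_add_segCount : ∀ (segs : List (List Int)) (init : Int),
    segs.foldl (fun total seg => total + segCount seg) init
      = init + (segs.map chg).sum
  | [], init => by simp
  | s :: t, init => by
    simp only [List.foldl_cons, List.map_cons, List.sum_cons]
    rw [foldl_add_segCount t, segCount_eq_chg]
    ring

-- value of the whole pipeline after the stage-1 fold finishes
def finishB (st : List (List Int) × List Int) : Int :=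
  (if st.2 ≠ [] then st.1 ++ [st.2] else st.1).foldl (fun total seg => total + segCount seg) 0

lemma finishB_eq (st : List (List Int) × List Int) :
    finishB st = (st.1.map chg).sum + chg st.2 := by
  unfold finishB
  by_cases h : st.2 = []
  · simp [h, foldl_add_segCount, chg]
  · rw [if_pos (by simpa using h), foldl_add_segCount]
    simp

-- main stage-1 invariant
lemma stage1_inv : ∀ (s : List Int) (segs : List (List Int)) (cur : List Int),
    (0 : Int) ∉ cur →
    finishB (s.foldl stage1 (segs, cur))
      = (segs.map chg).sum + chg cur + oppRun (cur.getLastD 0) s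
  | [], segs, cur, _ => by simp [finishB_eq, oppRun]
  | x :: t, segs, cur, hcur => by
    simp only [List.foldl_cons]
    by_cases hx : x = 0
    · subst hx
      by_cases hc : cur = []
      · subst hc
        rw [show stage1 (segs, ([] : List Int)) 0 = (segs, []) from by simp [stage1]]
        rw [stage1_inv t segs [] (by simp), oppRun_zero]
        simp [chg, List.getLastD]
      · rw [show stage1 (segs, cur) 0 = (segs ++ [cur], []) from by simp [stage1, hc]]
        rw [stage1_inv t (segs ++ [cur]) [] (by simp), oppRun_zero]
        simp only [List.map_append, List.sum_append, List.map_cons, List.map_nil,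
          List.sum_cons, List.sum_nil]
        simp [chg, List.getLastD]
    · rw [show stage1 (segs, cur) x = (segs, cur ++ [x]) from by simp [stage1, hx]]
      have hnz : (0 : Int) ∉ cur ++ [x] := by
        simp only [List.mem_append, List.mem_singleton]
        rintro (h | h)
        · exact hcur h
        · exact hx h.symm
      rw [stage1_inv t segs (cur ++ [x]) hnz]
      have hlast : (cur ++ [x]).getLastD 0 = x := by simp
      rw [hlast, chg_append]
      have hite : (if cur ≠ [] ∧ cur.getLastD 0 ≠ x then (1:Int) else 0)
          = (if cur.getLastD 0 ≠ 0 ∧ x ≠ 0 ∧ cur.getLastD 0 ≠ x then 1 else 0) := by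
        by_cases hc : cur = []
        · subst hc
          simp [List.getLastD]
        · have h0 := lastD_ne_zero cur hcur hc
          by_cases he : cur.getLastD 0 = x
          · rw [if_neg (fun h => h.2 he), if_neg (fun h => h.2.2 he)]
          · rw [if_pos ⟨hc, he⟩, if_pos ⟨h0, hx, he⟩]
      simp only [oppRun]
      rw [hite]
      ring

lemma oppRun_signs : ∀ (t : List Int) (b a : Int),
    oppRun (sgnB a b) (signsB (b :: t)) = tri (a :: b :: t)
  | [], b, a => by simp [signsB, tri, oppRun]
  | c :: t', b, a => by
    have hsig : signsB (b :: c :: t') = sgnB b c :: signsB (c :: t') := by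
      simp [signsB]
    rw [hsig]
    simp only [oppRun]
    rw [oppRun_signs t' c b]
    show _ = tri (a :: b :: c :: t')
    simp only [tri]
    have hcond : (if sgnB a b ≠ 0 ∧ sgnB b c ≠ 0 ∧ sgnB a b ≠ sgnB b c then (1:Int) else 0)
        = (if b > a ∧ b > c then 1 else if b < a ∧ b < c then 1 else 0) := by
      unfold sgnB
      split_ifs <;> omega
    rw [hcond]

lemma B_eq_tri : ∀ (l : List Int), count_oscillations_alt l = tri l
  | [] => by simp [count_oscillations_alt, signsB, tri, segCount]
  | [_] => by simp [count_oscillations_alt, signsB, tri, segCount]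
  | a :: b :: t => by
    have h := stage1_inv (signsB (a :: b :: t)) [] [] (by simp)
    have hsig : signsB (a :: b :: t) = sgnB a b :: signsB (b :: t) := by
      simp [signsB]
    have halt : count_oscillations_alt (a :: b :: t)
        = finishB ((signsB (a :: b :: t)).foldl stage1 ([], [])) := rfl
    rw [halt, h, hsig]
    simp only [oppRun, chg, List.map_nil, List.sum_nil, List.getLastD]
    rw [oppRun_signs t b a]
    simp

-- ===== VERDICT (by name: the statement is the Claim_ definition above) =====
theorem count_oscillations_spec : Claim_equal_count_oscillations := by
  intro values _
  unfold Spec_count_oscillations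
  rw [A_eq_tri, B_eq_tri]
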